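-- pv_equiv track=rewrite | github.com/india-babai/Python_tutorial | Tutorial 2.py | period_count
-- ===== SOURCE A (Python) =====
-- def period_count(signal):
--     '''
--     Parameters
--     ----------
--     signal : Sequence of 1's and 0's
--
--
--     Returns
--     -------
--     T : number of complete cycles/period in the sequence
--
--     '''
--
--
--     period_count = 0
--     previous_value = None
--
--
--     list_of_cycle_lenghts = []
--     cycle_length = 0
--
--
--     for binary_value in signal:
--
--         if previous_value is None:
--             previous_value = binary_value #Setting the initial state of previous_value
--
--
--
--         if previous_value == 0 and binary_value == 1 :
--             period_count = period_count + 1 # Transition from 0 to 1 indicates a complete cycle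
--
--             list_of_cycle_lenghts.append(cycle_length + 1)
--
--             cycle_length = 0
--
--
--         else:
--             cycle_length = cycle_length + 1
--
--
--
--         previous_value = binary_value # Storing the previous value at the end of the for loop
--
--
--
--
--     return period_count, list_of_cycle_lenghts
-- ===== SOURCE B (Python) =====
-- def period_count(sig):
--     # pass 1: collect the positions of rising edges (previous value 0, current value 1)
--     transitions = []
--     prev = None
--     for i, x in enumerate(sig):
--         if prev == 0 and x == 1:
--             transitions.append(i)
--         prev = x
--     # pass 2: cycle lengths are the gaps between consecutive transition positions,
--     # with a virtual previous transition at position -1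
--     lengths = []
--     p = -1
--     for t in transitions:
--         lengths.append(t - p)
--         p = t
--     return len(transitions), lengths
-- ===== Notes on version B (the rewrite author's own statement) =====
-- stated objective: alternative
-- what changed: Replaces A's single scan threading a cycle_length accumulator with a two-phase decomposition: one pass collects rising-edge positions, a second pass turns consecutive position gaps (virtual previous position -1) into cycle lengths, and the count is just the number of positions.
import Mathlib
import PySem

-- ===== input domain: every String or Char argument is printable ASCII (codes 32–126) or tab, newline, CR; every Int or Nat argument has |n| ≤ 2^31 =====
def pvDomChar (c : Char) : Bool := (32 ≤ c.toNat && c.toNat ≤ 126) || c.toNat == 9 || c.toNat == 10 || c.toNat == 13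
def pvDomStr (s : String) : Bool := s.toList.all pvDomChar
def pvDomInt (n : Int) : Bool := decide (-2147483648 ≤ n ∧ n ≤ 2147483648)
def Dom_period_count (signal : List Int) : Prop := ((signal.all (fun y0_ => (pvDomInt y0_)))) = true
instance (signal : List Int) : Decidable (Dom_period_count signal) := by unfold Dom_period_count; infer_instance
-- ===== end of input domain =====

-- B replaces A's single accumulator-threading scan by a two-phase decomposition
-- (collect rising-edge positions, then take gaps between consecutive positions); alternative, same cost.

-- ===== PORT A =====
-- loop body of A: state = (period_count, previous_value, list_of_cycle_lenghts, cycle_length)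
def pvStepA (st : Int × Option Int × List Int × Int) (binary_value : Int) :
    Int × Option Int × List Int × Int :=
  let pc := st.1
  let prev := st.2.1
  let lst := st.2.2.1
  let cl := st.2.2.2
  let prev := if prev = none then some binary_value else prev
  if prev = some 0 ∧ binary_value = 1 then
    (pc + 1, some binary_value, lst ++ [cl + 1], (0 : Int))
  else
    (pc, some binary_value, lst, cl + 1)

def period_count (signal : List Int) : Int × List Int :=
  let st := signal.foldl pvStepA (0, none, [], 0)
  (st.1, st.2.2.1)

-- ===== PORT B =====
-- pass 1 of Source B: fold over enumerate(signal) collecting rising-edge positions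
def pvStepB (st : List Int × Option Int) (ix : Int × Int) : List Int × Option Int :=
  if st.2 = some 0 ∧ ix.2 = 1 then (st.1 ++ [ix.1], some ix.2) else (st.1, some ix.2)

-- pass 2 of Source B: gaps between consecutive positions, virtual previous position -1
def pvStepG (st : List Int × Int) (t : Int) : List Int × Int :=
  (st.1 ++ [t - st.2], t)

def period_count_alt (signal : List Int) : Int × List Int :=
  let transitions := ((PySem.List.enumerate signal 0).foldl pvStepB ([], none)).1
  let lengths := (transitions.foldl pvStepG ([], -1)).1
  ((transitions.length : Int), lengths)

-- ===== PRECONDITION & SPEC =====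
def Spec_period_count (signal : List Int) (out : Int × List Int) : Prop := out = period_count_alt signal
instance (signal : List Int) (out : Int × List Int) : Decidable (Spec_period_count signal out) := by unfold Spec_period_count; infer_instance

-- ===== CLAIM (what is proved, stated in full; the proofs are below) =====
def Claim_equal_period_count : Prop := ∀ (signal : List Int), Dom_period_count signal → Spec_period_count signal (period_count signal)

-- ===== LEMMAS AND PROOFS =====

-- positions (starting at index i) of rising edges, given the previous value
def pvTpos (prev i : Int) : List Int → List Int
  | [] => []
  | c :: r => if prev = 0 ∧ c = 1 then i :: pvTpos c (i + 1) r else pvTpos c (i + 1) r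

-- gaps between consecutive positions, previous position p
def pvGaps (p : Int) : List Int → List Int
  | [] => []
  | t :: ts => (t - p) :: pvGaps t ts

theorem pvStepA_pos (pc prev : Int) (lst : List Int) (cl c : Int)
    (h : prev = 0 ∧ c = 1) :
    pvStepA (pc, some prev, lst, cl) c = (pc + 1, some c, lst ++ [cl + 1], 0) := by
  obtain ⟨h0, h1⟩ := h
  subst h0; subst h1
  simp [pvStepA]

theorem pvStepA_neg (pc prev : Int) (lst : List Int) (cl c : Int)
    (h : ¬ (prev = 0 ∧ c = 1)) :
    pvStepA (pc, some prev, lst, cl) c = (pc, some c, lst, cl + 1) := by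
  simp only [pvStepA]
  rw [if_neg (by simpa using h)]

theorem pvStepA_first (pc : Int) (lst : List Int) (cl c : Int) :
    pvStepA (pc, none, lst, cl) c = (pc, some c, lst, cl + 1) := by
  simp only [pvStepA]
  rw [if_neg (by rintro ⟨h0, h1⟩; simp at h0; omega)]

theorem pvStepB_pos (trans : List Int) (prev i c : Int) (h : prev = 0 ∧ c = 1) :
    pvStepB (trans, some prev) (i, c) = (trans ++ [i], some c) := by
  obtain ⟨h0, h1⟩ := h
  subst h0; subst h1
  simp [pvStepB]

theorem pvStepB_neg (trans : List Int) (prev i c : Int) (h : ¬ (prev = 0 ∧ c = 1)) :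
    pvStepB (trans, some prev) (i, c) = (trans, some c) := by
  simp only [pvStepB]
  rw [if_neg (by simpa using h)]

theorem pvStepB_first (trans : List Int) (i c : Int) :
    pvStepB (trans, none) (i, c) = (trans, some c) := by
  simp [pvStepB]

theorem pvLoopA (xs : List Int) : ∀ (pc prev : Int) (lst : List Int) (cl p i : Int),
    cl = i - p - 1 →
    (xs.foldl pvStepA (pc, some prev, lst, cl)).1 = pc + ((pvTpos prev i xs).length : Int)
    ∧ (xs.foldl pvStepA (pc, some prev, lst, cl)).2.2.1 = lst ++ pvGaps p (pvTpos prev i xs) := by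
  induction xs with
  | nil => intro pc prev lst cl p i hcl; simp [pvTpos, pvGaps]
  | cons c r ih =>
    intro pc prev lst cl p i hcl
    by_cases h : prev = 0 ∧ c = 1
    · rw [List.foldl_cons, pvStepA_pos pc prev lst cl c h]
      have hcl1 : cl + 1 = i - p := by omega
      rw [hcl1]
      obtain ⟨hc, hl⟩ := ih (pc + 1) c (lst ++ [i - p]) 0 i (i + 1) (by ring)
      constructor
      · rw [hc]; simp [pvTpos, h]
        ring
      · rw [hl]
        have : pvTpos prev i (c :: r) = i :: pvTpos c (i + 1) r := by simp [pvTpos, h]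
        rw [this]; simp [pvGaps]
    · rw [List.foldl_cons, pvStepA_neg pc prev lst cl c h]
      obtain ⟨hc, hl⟩ := ih pc c lst (cl + 1) p (i + 1) (by omega)
      have ht : pvTpos prev i (c :: r) = pvTpos c (i + 1) r := by simp [pvTpos, h]
      rw [ht]
      exact ⟨hc, hl⟩

theorem pvLoopB (xs : List Int) : ∀ (k : Int) (trans : List Int) (prev : Int),
    ((PySem.List.enumerate xs k).foldl pvStepB (trans, some prev)).1
      = trans ++ pvTpos prev k xs := by
  induction xs with
  | nil => intro k trans prev; simp [PySem.List.enumerate_nil, pvTpos]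
  | cons c r ih =>
    intro k trans prev
    rw [PySem.List.enumerate_cons, List.foldl_cons]
    by_cases h : prev = 0 ∧ c = 1
    · rw [pvStepB_pos trans prev k c h, ih (k + 1) (trans ++ [k]) c]
      have : pvTpos prev k (c :: r) = k :: pvTpos c (k + 1) r := by simp [pvTpos, h]
      rw [this]; simp
    · rw [pvStepB_neg trans prev k c h, ih (k + 1) trans c]
      have : pvTpos prev k (c :: r) = pvTpos c (k + 1) r := by simp [pvTpos, h]
      rw [this]

theorem pvLoopGaps (ts : List Int) : ∀ (lens : List Int) (p : Int),
    (ts.foldl pvStepG (lens, p)).1 = lens ++ pvGaps p ts := by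
  induction ts with
  | nil => intro lens p; simp [pvGaps]
  | cons t ts ih =>
    intro lens p
    rw [List.foldl_cons]
    show ((ts.foldl pvStepG (lens ++ [t - p], t))).1 = lens ++ pvGaps p (t :: ts)
    rw [ih (lens ++ [t - p]) t]
    simp [pvGaps]

-- ===== VERDICT (by name: the statement is the Claim_ definition above) =====
theorem period_count_spec : Claim_equal_period_count := by
  intro signal _
  unfold Spec_period_count period_count period_count_alt
  cases signal with
  | nil => simp [PySem.List.enumerate_nil]
  | cons x xs =>
    rw [PySem.List.enumerate_cons, List.foldl_cons, List.foldl_cons,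
      pvStepA_first 0 [] 0 x, pvStepB_first [] 0 x]
    obtain ⟨hc, hl⟩ := pvLoopA xs 0 x [] 1 (-1) 1 (by ring)
    show ((xs.foldl pvStepA (0, some x, [], 0 + 1)).1, (xs.foldl pvStepA (0, some x, [], 0 + 1)).2.2.1)
        = (((((PySem.List.enumerate xs (0 + 1)).foldl pvStepB ([], some x)).1.length : Int)),
           ((((PySem.List.enumerate xs (0 + 1)).foldl pvStepB ([], some x)).1).foldl pvStepG ([], -1)).1)
    have e1 : (0 : Int) + 1 = 1 := by norm_num
    rw [e1, hc, hl, pvLoopB xs 1 [] x]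
    simp only [List.nil_append]
    rw [pvLoopGaps (pvTpos x 1 xs) [] (-1)]
    simp
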